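-- pv_equiv track=rewrite | github.com/kastomd/Editor_indice_Py | app_md/logic_swap/pmdl/bt3_to_ttt.py | _padre_bone_id
-- ===== SOURCE A (Python) =====
-- def _padre_bone_id(bt3_parts: list, part_idx: int) -> int:
--     """Retorna el bone_id del padre de la parte en la jerarquía BT3."""
--     pila = []
--     for i, part in enumerate(bt3_parts):
--         padre = pila[-1] if pila else None
--         if i == part_idx:
--             if padre is not None:
--                 return bt3_parts[padre].get("bone_id", 0)
--             return 0
--         pila.append(i)
--         for _ in range(part.get("anclaje", 0)):
--             if pila:
--                 pila.pop()
--     return 0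
-- ===== SOURCE B (Python) =====
-- def _padre_bone_id(bt3_parts: list, part_idx: int) -> int:
--     """Retorna el bone_id del padre de la parte en la jerarquía BT3."""
--     if not (0 <= part_idx < len(bt3_parts)):
--         return 0
--     # reverse bracket-matching scan: no stack, just a balance counter
--     balance = 0
--     for i in range(part_idx - 1, -1, -1):
--         balance += max(bt3_parts[i].get("anclaje", 0), 0)
--         if balance > 0:
--             balance -= 1
--         else:
--             return bt3_parts[i].get("bone_id", 0)
--     return 0
-- ===== Notes on version B (the rewrite author's own statement) =====
-- stated objective: alternative
-- what changed: Replaced the forward simulation that maintains an explicit parent stack (push each index, pop 'anclaje' times) with a reverse bracket-matching scan from part_idx-1 down that keeps only an integer balance counter and stops at the first unmatched opener.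
import Mathlib
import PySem

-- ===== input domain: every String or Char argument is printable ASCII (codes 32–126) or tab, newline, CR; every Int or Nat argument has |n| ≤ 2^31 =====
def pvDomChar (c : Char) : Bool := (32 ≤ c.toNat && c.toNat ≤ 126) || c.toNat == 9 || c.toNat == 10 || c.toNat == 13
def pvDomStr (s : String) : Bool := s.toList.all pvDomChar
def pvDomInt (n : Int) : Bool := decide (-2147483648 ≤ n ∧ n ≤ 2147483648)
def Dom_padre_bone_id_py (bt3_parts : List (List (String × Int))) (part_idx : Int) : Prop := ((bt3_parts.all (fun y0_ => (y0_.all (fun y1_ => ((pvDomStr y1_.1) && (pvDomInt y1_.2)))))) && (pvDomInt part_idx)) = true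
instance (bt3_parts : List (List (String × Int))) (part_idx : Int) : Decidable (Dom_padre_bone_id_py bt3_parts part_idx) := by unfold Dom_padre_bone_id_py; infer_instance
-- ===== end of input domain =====

-- B replaces A's forward stack simulation by a reverse bracket-matching scan with a
-- single balance counter (objective: alternative/simpler; same return value everywhere).

-- ===== PORT A =====

-- dict.get(k, dflt) on an association list (first match wins)
def pvGet (d : List (String × Int)) (k : String) (dflt : Int) : Int :=
  (d.lookup k).getD dflt

-- 'for _ in range(a): if pila: pila.pop()'  (stack kept top-first; popping an empty list is a no-op)
def pvPopN : Nat → List Nat → List Nat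
  | 0, l => l
  | n + 1, l => pvPopN n l.tail

-- A's forward loop over 'enumerate(bt3_parts)' with index i and stack pila (top-first)
def pvALoop (bt3 : List (List (String × Int))) (part_idx : Int) :
    Nat → List Nat → List (List (String × Int)) → Int
  | _, _, [] => 0
  | i, pila, part :: rest =>
    if (i : Int) = part_idx then
      match pila with
      | padre :: _ => pvGet ((PySem.List.pyGet? bt3 (padre : Int)).getD []) "bone_id" 0
      | [] => 0
    else
      pvALoop bt3 part_idx (i + 1) (pvPopN (pvGet part "anclaje" 0).toNat (i :: pila)) rest

def padre_bone_id_py (bt3_parts : List (List (String × Int))) (part_idx : Int) : Int :=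
  pvALoop bt3_parts part_idx 0 [] bt3_parts

-- ===== PORT B =====

-- B's reverse loop 'for i in range(part_idx - 1, -1, -1)': n parts left to scan (index n-1 next)
def pvBScan (bt3 : List (List (String × Int))) : Nat → Int → Int
  | 0, _ => 0
  | n + 1, bal =>
    let bal' := bal + max (pvGet (bt3.getD n []) "anclaje" 0) 0
    if bal' > 0 then pvBScan bt3 n (bal' - 1)
    else pvGet (bt3.getD n []) "bone_id" 0

def padre_bone_id_py_alt (bt3_parts : List (List (String × Int))) (part_idx : Int) : Int :=
  if 0 ≤ part_idx ∧ part_idx < (bt3_parts.length : Int) then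
    pvBScan bt3_parts part_idx.toNat 0
  else 0

-- ===== PRECONDITION & SPEC =====
def Spec_padre_bone_id_py (bt3_parts : List (List (String × Int))) (part_idx : Int) (out : Int) : Prop := out = padre_bone_id_py_alt bt3_parts part_idx
instance (bt3_parts : List (List (String × Int))) (part_idx : Int) (out : Int) : Decidable (Spec_padre_bone_id_py bt3_parts part_idx out) := by unfold Spec_padre_bone_id_py; infer_instance

-- ===== CLAIM (what is proved, stated in full; the proofs are below) =====
def Claim_equal_padre_bone_id_py : Prop := ∀ (bt3_parts : List (List (String × Int))) (part_idx : Int), Dom_padre_bone_id_py bt3_parts part_idx → Spec_padre_bone_id_py bt3_parts part_idx (padre_bone_id_py bt3_parts part_idx)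

-- ===== LEMMAS AND PROOFS =====

-- clamped anclaje of part n, as a pop count
def pvAN (bt3 : List (List (String × Int))) (n : Nat) : Nat :=
  (pvGet (bt3.getD n []) "anclaje" 0).toNat

-- stack (top-first) after A has processed parts 0..n-1 (one push then pvAN pops each)
def pvStk (bt3 : List (List (String × Int))) : Nat → List Nat
  | 0 => []
  | n + 1 => (n :: pvStk bt3 n).drop (pvAN bt3 n)

-- bone_id of the b-th stack entry (0 if the stack is shorter)
def pvBoneNth (bt3 : List (List (String × Int))) (S : List Nat) (b : Nat) : Int :=
  match S[b]? with
  | some j => pvGet (bt3.getD j []) "bone_id" 0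
  | none => 0

theorem pvPopN_eq_drop (n : Nat) (l : List Nat) : pvPopN n l = l.drop n := by
  induction n generalizing l with
  | zero => rfl
  | succ n ih =>
    cases l with
    | nil => simp [pvPopN, ih]
    | cons x xs => simp [pvPopN, ih]

theorem pvBScan_eq (bt3 : List (List (String × Int))) :
    ∀ (n b : Nat), pvBScan bt3 n (b : Int) = pvBoneNth bt3 (pvStk bt3 n) b := by
  intro n
  induction n with
  | zero => intro b; simp [pvBScan, pvStk, pvBoneNth]
  | succ n ih =>
    intro b
    have hmax : max (pvGet (bt3.getD n []) "anclaje" 0) 0 = ((pvAN bt3 n : Nat) : Int) := by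
      simp [pvAN]
    rw [pvBScan, hmax]
    have hcast : (b : Int) + ((pvAN bt3 n : Nat) : Int) = ((b + pvAN bt3 n : Nat) : Int) := by
      push_cast; ring
    rw [hcast]
    by_cases h : 0 < b + pvAN bt3 n
    · have hpos : ((b + pvAN bt3 n : Nat) : Int) > 0 := by exact_mod_cast h
      rw [if_pos hpos]
      have h1 : ((b + pvAN bt3 n : Nat) : Int) - 1 = ((b + pvAN bt3 n - 1 : Nat) : Int) := by
        omega
      rw [h1, ih]
      show pvBoneNth bt3 (pvStk bt3 n) (b + pvAN bt3 n - 1)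
        = pvBoneNth bt3 (pvStk bt3 (n + 1)) b
      rw [pvStk]
      unfold pvBoneNth
      rw [List.getElem?_drop]
      have h2 : pvAN bt3 n + b = (b + pvAN bt3 n - 1) + 1 := by omega
      rw [h2, List.getElem?_cons_succ]
    · have hb0 : b = 0 := by omega
      have ha0 : pvAN bt3 n = 0 := by omega
      have hnpos : ¬ ((b + pvAN bt3 n : Nat) : Int) > 0 := by
        rw [hb0, ha0]; simp
      rw [if_neg hnpos]
      rw [pvStk]
      unfold pvBoneNth
      rw [ha0, hb0]
      simp

theorem pvALoop_eq (bt3 : List (List (String × Int))) (p : Int) :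
    ∀ (rest : List (List (String × Int))) (i : Nat) (S : List Nat),
      rest = bt3.drop i →
      pvALoop bt3 p i S rest =
        if 0 ≤ p ∧ (i : Int) ≤ p ∧ p < (bt3.length : Int) then
          pvBoneNth bt3 ((List.range' i (p.toNat - i)).foldl
            (fun T j => (j :: T).drop (pvAN bt3 j)) S) 0
        else 0 := by
  intro rest
  induction rest with
  | nil =>
    intro i S h
    have hlen : bt3.length ≤ i := by
      have := List.drop_eq_nil_iff.mp h.symm
      omega
    rw [pvALoop]
    rw [if_neg]
    rintro ⟨h0, hi, hl⟩
    omega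
  | cons part rest' ih =>
    intro i S h
    have hi : i < bt3.length := by
      by_contra hc
      rw [List.drop_eq_nil_of_le (by omega)] at h
      simp at h
    have hpart : part = bt3.getD i [] := by
      have h0 : (bt3.drop i)[0]? = some part := by rw [← h]; rfl
      rw [List.getElem?_drop, Nat.add_zero] at h0
      simp only [List.getD, h0, Option.getD_some]
    have hrest' : rest' = bt3.drop (i + 1) := by
      have ht := congrArg List.tail h
      simpa [List.tail_drop] using ht
    rw [pvALoop.eq_def]
    simp only []
    by_cases heq : (i : Int) = p
    · rw [if_pos heq]
      have hcond : 0 ≤ p ∧ (i : Int) ≤ p ∧ p < (bt3.length : Int) := by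
        refine ⟨by omega, le_of_eq heq, ?_⟩
        rw [← heq]; exact_mod_cast hi
      rw [if_pos hcond]
      have hz : p.toNat - i = 0 := by omega
      rw [hz]
      simp only [List.range'_zero, List.foldl_nil]
      cases S with
      | nil => simp [pvBoneNth]
      | cons padre T =>
        simp only [pvBoneNth, List.getElem?_cons_zero]
        rw [PySem.List.pyGet?_natCast]
        simp [List.getD]
    · rw [if_neg heq]
      rw [ih (i + 1) _ hrest']
      have hstep : pvPopN (pvGet part "anclaje" 0).toNat (i :: S)
          = (i :: S).drop (pvAN bt3 i) := by
        rw [pvPopN_eq_drop, hpart]; rfl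
      rw [hstep]
      by_cases hc : 0 ≤ p ∧ ((i : Nat) : Int) + 1 ≤ p ∧ p < (bt3.length : Int)
      · have hc' : 0 ≤ p ∧ ((i : Nat) : Int) ≤ p ∧ p < (bt3.length : Int) :=
          ⟨hc.1, by omega, hc.2.2⟩
        rw [if_pos (by exact_mod_cast hc), if_pos hc']
        have hk : p.toNat - i = (p.toNat - (i + 1)) + 1 := by omega
        rw [hk, List.range'_succ, List.foldl_cons]
      · rw [if_neg (by exact_mod_cast hc), if_neg]
        rintro ⟨h0, hle, hl⟩
        exact hc ⟨h0, by omega, hl⟩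

theorem pvStk_eq_foldl (bt3 : List (List (String × Int))) (n : Nat) :
    pvStk bt3 n = (List.range n).foldl (fun T j => (j :: T).drop (pvAN bt3 j)) [] := by
  induction n with
  | zero => rfl
  | succ n ih => rw [pvStk, List.range_succ, List.foldl_append, ← ih]; rfl

-- ===== VERDICT (by name: the statement is the Claim_ definition above) =====
theorem padre_bone_id_py_spec : Claim_equal_padre_bone_id_py := by
  intro bt3 p _
  unfold Spec_padre_bone_id_py padre_bone_id_py padre_bone_id_py_alt
  rw [pvALoop_eq bt3 p bt3 0 [] rfl]
  by_cases hc : 0 ≤ p ∧ p < (bt3.length : Int)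
  · rw [if_pos ⟨hc.1, by exact_mod_cast hc.1, hc.2⟩, if_pos hc]
    have h0 : ((0 : Nat) : Int) = (0 : Int) := rfl
    rw [← h0, pvBScan_eq bt3 p.toNat 0, pvStk_eq_foldl]
    simp [List.range_eq_range']
  · rw [if_neg (by rintro ⟨h0, _, hl⟩; exact hc ⟨h0, hl⟩), if_neg hc]
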